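-- pv_equiv track=rewrite | github.com/dasha2000vas/python_gym | lesson_10/classwork/changing_string.py | changing_string
-- ===== SOURCE A (Python) =====
-- def changing_string(original_string: str) -> str:
--     """
--     Modifies entered original string.
--     Doubles symbols with even indexes,
--     replaces symbols with odd indexes
--     with their codes.
--
--     Args:
--         original_string (str): Original string.
--
--     Returns:
--         updated_string (str): Modified string.
--     """
--     updated_string = ""
--     if not isinstance(original_string, str):
--         raise ValueError('Original must be a string')
--     for i in range(len(original_string)):
--         if i % 2 == 0:
--             updated_string += original_string[i] * 2
--         else:
--             updated_string += str(ord(original_string[i]))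
--     return updated_string
-- ===== SOURCE B (Python) =====
-- def changing_string(original_string: str) -> str:
--     """Parity-split re-implementation: two slicing passes plus a zip merge
--     instead of an index-by-index loop."""
--     if not isinstance(original_string, str):
--         raise ValueError('Original must be a string')
--     evens = [c * 2 for c in original_string[::2]]
--     odds = [str(ord(c)) for c in original_string[1::2]] + ['']
--     return ''.join(e + o for e, o in zip(evens, odds))
-- ===== Notes on version B (the rewrite author's own statement) =====
-- stated objective: alternative
-- what changed: Replaces the single index-by-index loop with parity test by two parity-keyed slicing passes (s[::2] doubled, s[1::2] mapped to ord codes) merged with zip+join.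
import Mathlib
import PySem

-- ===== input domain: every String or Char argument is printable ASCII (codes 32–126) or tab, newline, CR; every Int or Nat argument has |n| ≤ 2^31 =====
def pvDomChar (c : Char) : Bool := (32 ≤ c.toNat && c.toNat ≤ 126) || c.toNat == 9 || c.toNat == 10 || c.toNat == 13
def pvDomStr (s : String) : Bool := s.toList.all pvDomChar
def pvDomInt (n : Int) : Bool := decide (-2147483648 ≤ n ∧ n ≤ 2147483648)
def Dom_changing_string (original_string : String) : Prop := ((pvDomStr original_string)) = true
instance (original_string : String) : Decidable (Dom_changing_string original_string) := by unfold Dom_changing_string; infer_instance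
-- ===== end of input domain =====

-- B replaces A's single index-by-index loop with two parity slicing passes merged by zip+join (alternative decomposition, same result).


-- ===== PORT A =====
-- literal port of A's loop: for i in range(len(s)): acc += s[i]*2 if i%2==0 else str(ord(s[i]))
-- (the index is always in range, so s[i] is ported as pyGetD with an unused default)
def changing_string (original_string : String) : String :=
  let cs := original_string.toList
  String.ofList ((PySem.List.pyRange 0 (cs.length : Int) 1).foldl (fun acc i =>
    let c := PySem.List.pyGetD cs i '?'
    acc ++ (if PySem.Int.mod i 2 = 0 then [c, c] else PySem.Int.toChars (c.toNat : Int))) [])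

-- ===== PORT B =====
-- hand port of the step-2 slice s[k::2] (every other element from the front); exact for step 2
def pvEveryOther : List Char → List Char
  | [] => []
  | [c] => [c]
  | c :: _ :: rest => c :: pvEveryOther rest

def changing_string_alt (original_string : String) : String :=
  let cs := original_string.toList
  let evens := (pvEveryOther cs).map (fun c => [c, c])
  let odds := (pvEveryOther cs.tail).map (fun c => PySem.Int.toChars (c.toNat : Int)) ++ [[]]
  String.ofList (((evens.zip odds).map (fun p => p.1 ++ p.2)).flatten)

-- ===== PRECONDITION & SPEC =====
def Spec_changing_string (original_string : String) (out : String) : Prop := out = changing_string_alt original_string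
instance (original_string : String) (out : String) : Decidable (Spec_changing_string original_string out) := by unfold Spec_changing_string; infer_instance

-- ===== CLAIM (what is proved, stated in full; the proofs are below) =====
def Claim_equal_changing_string : Prop := ∀ (original_string : String), Dom_changing_string original_string → Spec_changing_string original_string (changing_string original_string)

-- ===== LEMMAS AND PROOFS =====

-- the common two-at-a-time characterisation of the result
def pvPairs : List Char → List Char
  | [] => []
  | [c] => [c, c]
  | c :: d :: rest => c :: c :: (PySem.Int.toChars (d.toNat : Int) ++ pvPairs rest)

-- every-other of a cons, via the tail
lemma everyOther_cons (x : Char) (l : List Char) :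
    pvEveryOther (x :: l) = x :: pvEveryOther l.tail := by
  cases l <;> rfl

-- B equals pvPairs: the zip merge consumes the list two elements at a time
lemma alt_eq_pairs (cs : List Char) :
    ((((pvEveryOther cs).map (fun c => [c, c])).zip
      ((pvEveryOther cs.tail).map (fun c => PySem.Int.toChars (c.toNat : Int)) ++ [[]])).map
      (fun p => p.1 ++ p.2)).flatten = pvPairs cs := by
  match cs with
  | [] => rfl
  | [c] => rfl
  | c :: d :: rest =>
    rw [List.tail_cons, everyOther_cons d rest,
      show pvEveryOther (c :: d :: rest) = c :: pvEveryOther rest from rfl]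
    simp only [List.map_cons, List.cons_append, List.zip_cons_cons, List.map_cons,
      List.flatten_cons, pvPairs]
    rw [alt_eq_pairs rest]
    simp

-- A's flatMap over the index range equals pvPairs
lemma A_flatMap_eq_pairs (cs : List Char) :
    (List.range cs.length).flatMap (fun j =>
      (if PySem.Int.mod ((j : Nat) : Int) 2 = 0 then
        [PySem.List.pyGetD cs ((j : Nat) : Int) '?', PySem.List.pyGetD cs ((j : Nat) : Int) '?']
      else PySem.Int.toChars ((PySem.List.pyGetD cs ((j : Nat) : Int) '?').toNat : Int))) = pvPairs cs := by
  match cs with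
  | [] => rfl
  | [c] =>
    simp [PySem.List.pyGetD_natCast, pvPairs, PySem.Int.mod]
  | c :: d :: rest =>
    have hr : List.range (rest.length + 1 + 1)
        = 0 :: 1 :: (List.range rest.length).map (fun j => j + 1 + 1) := by
      rw [List.range_succ_eq_map, List.range_succ_eq_map]
      simp [List.map_map, Function.comp_def]
    simp only [List.length_cons, hr, List.flatMap_cons, List.flatMap_map]
    have hbody : ∀ j ∈ List.range rest.length,
        (if PySem.Int.mod (((j + 1 + 1 : Nat)) : Int) 2 = 0 then
          [PySem.List.pyGetD (c :: d :: rest) (((j + 1 + 1 : Nat)) : Int) '?',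
           PySem.List.pyGetD (c :: d :: rest) (((j + 1 + 1 : Nat)) : Int) '?']
        else PySem.Int.toChars ((PySem.List.pyGetD (c :: d :: rest) (((j + 1 + 1 : Nat)) : Int) '?').toNat : Int))
        = (if PySem.Int.mod ((j : Nat) : Int) 2 = 0 then
          [PySem.List.pyGetD rest ((j : Nat) : Int) '?', PySem.List.pyGetD rest ((j : Nat) : Int) '?']
        else PySem.Int.toChars ((PySem.List.pyGetD rest ((j : Nat) : Int) '?').toNat : Int)) := by
      intro j _
      have hg : PySem.List.pyGetD (c :: d :: rest) (((j + 1 + 1 : Nat)) : Int) '?'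
          = PySem.List.pyGetD rest ((j : Nat) : Int) '?' := by
        rw [PySem.List.pyGetD_natCast, PySem.List.pyGetD_natCast]
        simp [List.getD]
      have hm : PySem.Int.mod (((j + 1 + 1 : Nat)) : Int) 2 = PySem.Int.mod ((j : Nat) : Int) 2 := by
        rw [show (((j + 1 + 1 : Nat)) : Int) = ((j + 2 : Nat) : Int) by push_cast; ring]
        rw [show ((2 : Int)) = ((2 : Nat) : Int) by norm_num] at *
        rw [PySem.Int.mod_natCast, PySem.Int.mod_natCast]
        norm_cast
        omega
      rw [hg, hm]
    have hcast : ∀ j : Nat, ((j : Int) + 1 + 1) = (((j + 1 + 1 : Nat)) : Int) := by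
      intro j; push_cast; ring
    rw [List.flatMap_congr hbody, A_flatMap_eq_pairs rest]
    simp [pvPairs, PySem.List.pyGetD, PySem.Int.mod]

-- ===== VERDICT (by name: the statement is the Claim_ definition above) =====
theorem changing_string_spec : Claim_equal_changing_string := by
  intro s _
  unfold Spec_changing_string changing_string changing_string_alt
  dsimp only
  rw [alt_eq_pairs]
  rw [PySem.List.foldl_append_eq_flatMap
    (fun i => (if PySem.Int.mod i 2 = 0 then
        [PySem.List.pyGetD s.toList i '?', PySem.List.pyGetD s.toList i '?']
      else PySem.Int.toChars ((PySem.List.pyGetD s.toList i '?').toNat : Int)))]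
  rw [PySem.List.pyRange_zero_natCast, List.flatMap_map, List.nil_append]
  rw [A_flatMap_eq_pairs s.toList]
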